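-- pv_equiv track=rewrite | github.com/koanatakiyo/BenchBench | scripts/converters/tombench_parser.py | clean_option_content
-- ===== SOURCE A (Python) =====
-- def clean_option_content(option_content, option_letter):
--     """
--     Clean option content by removing various prefixes and extra whitespace
--     """
--     if not option_content:
--         return ""
--
--     # Convert to string if needed
--     option_content = str(option_content)
--
--     # Remove various prefix patterns
--     prefixes_to_remove = [
--         f"{option_letter}. ",      # "A. "
--         f"{option_letter}.",       # "A."
--         f"{option_letter}: ",      # "A: "
--         f"{option_letter}:",       # "A:"
--         f" {option_letter}. ",    # " A. " (with leading space)
--         f" {option_letter}.",     # " A." (with leading space)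
--         f" {option_letter}: ",    # " A: " (with leading space)
--         f" {option_letter}:",     # " A:" (with leading space)
--     ]
--
--     # Try to remove each prefix pattern
--     for prefix in prefixes_to_remove:
--         if option_content.startswith(prefix):
--             option_content = option_content[len(prefix):]
--             break
--
--     # Clean up extra whitespace
--     option_content = option_content.strip()
--
--     return option_content
-- ===== SOURCE B (Python) =====
-- import re
--
-- def clean_option_content(option_content, option_letter):
--     """
--     Clean option content by removing various prefixes and extra whitespace
--     """
--     if not option_content:
--         return ""
--     option_content = str(option_content)
--     # One anchored regex replaces the 8-element prefix list + loop:
--     # optional single leading space, the letter, '.' or ':', optional single trailing space.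
--     pattern = r'^ ?' + re.escape(str(option_letter)) + r'[.:] ?'
--     option_content = re.sub(pattern, '', option_content, count=1)
--     return option_content.strip()
-- ===== Notes on version B (the rewrite author's own statement) =====
-- stated objective: idiomatic
-- what changed: The 8-element prefix list and its startswith/break loop are replaced by a single anchored regex '^ ?<letter>[.:] ?' applied once with re.sub, whose greedy optional spaces encode the loop's longest-first matching.
import Mathlib
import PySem

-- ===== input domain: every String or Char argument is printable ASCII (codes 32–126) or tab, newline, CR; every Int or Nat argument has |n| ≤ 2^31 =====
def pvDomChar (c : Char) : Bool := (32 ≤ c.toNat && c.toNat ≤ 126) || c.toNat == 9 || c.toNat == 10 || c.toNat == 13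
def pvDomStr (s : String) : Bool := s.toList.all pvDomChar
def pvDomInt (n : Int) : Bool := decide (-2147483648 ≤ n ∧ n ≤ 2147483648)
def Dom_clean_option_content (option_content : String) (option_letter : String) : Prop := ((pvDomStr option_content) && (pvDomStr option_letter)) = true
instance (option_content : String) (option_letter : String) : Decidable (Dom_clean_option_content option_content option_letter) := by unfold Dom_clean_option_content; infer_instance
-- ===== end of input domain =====

-- B replaces A's 8-prefix list and break loop by a single anchored regex applied once (idiomatic); same return value.

-- ===== PORT A =====
-- the 8 prefix strings of A, in A's order
def pvPrefixes (L : List Char) : List (List Char) :=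
  [L ++ ['.', ' '], L ++ ['.'], L ++ [':', ' '], L ++ [':'],
   (' ' :: L) ++ ['.', ' '], (' ' :: L) ++ ['.'], (' ' :: L) ++ [':', ' '], (' ' :: L) ++ [':']]

-- the loop: first prefix that matches is dropped (s[len(prefix):] with 0 ≤ len is List.drop), then break
def pvRemoveFirst (s : List Char) : List (List Char) → List Char
  | [] => s
  | p :: ps => if PySem.Chars.startswith s p then s.drop p.length else pvRemoveFirst s ps

def clean_option_content (option_content : String) (option_letter : String) : String :=
  match option_content.toList with
  | [] => ""  -- `if not option_content: return ""`
  | c :: t => String.ofList (PySem.Chars.strip (pvRemoveFirst (c :: t) (pvPrefixes option_letter.toList)))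

-- ===== PORT B =====
-- hand-compiled form of the anchored regex tail `<letter>[.:] ?` tried at position t (exact: after the
-- leading ' ?' the pattern has no further choice point; the trailing greedy ' ?' consumes a space iff present)
def pvMatchCore (L t : List Char) : Option (List Char) :=
  if PySem.Chars.startswith t L then
    let rest := t.drop L.length
    if rest.take 1 = ['.'] ∨ rest.take 1 = [':'] then
      let tail := rest.drop 1
      some (if PySem.Chars.startswith tail [' '] then tail.drop 1 else tail)
    else none
  else none

def clean_option_content_alt (option_content : String) (option_letter : String) : String :=
  match option_content.toList with
  | [] => ""
  | c :: t =>
      -- the leading greedy ' ?': try with the space consumed first, backtrack to no space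
      let rem :=
        match (if c = ' ' then pvMatchCore option_letter.toList t else none) with
        | some r => r
        | none => ((pvMatchCore option_letter.toList (c :: t)).getD (c :: t))
      String.ofList (PySem.Chars.strip rem)

-- ===== PRECONDITION & SPEC =====
def Spec_clean_option_content (option_content : String) (option_letter : String) (out : String) : Prop := out = clean_option_content_alt option_content option_letter
instance (option_content : String) (option_letter : String) (out : String) : Decidable (Spec_clean_option_content option_content option_letter out) := by unfold Spec_clean_option_content; infer_instance

-- ===== CLAIM (what is proved, stated in full; the proofs are below) =====
def Claim_equal_clean_option_content : Prop := ∀ (option_content : String) (option_letter : String), Dom_clean_option_content option_content option_letter → Spec_clean_option_content option_content option_letter (clean_option_content option_content option_letter)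

-- ===== LEMMAS AND PROOFS =====

-- pvMatchCore, characterised as the four no-leading-space prefix tests of A (in A's order)
theorem pvMatchCore_eq (L t : List Char) :
    pvMatchCore L t =
      if PySem.Chars.startswith t (L ++ ['.', ' ']) then some (t.drop (L.length + 2))
      else if PySem.Chars.startswith t (L ++ ['.']) then some (t.drop (L.length + 1))
      else if PySem.Chars.startswith t (L ++ [':', ' ']) then some (t.drop (L.length + 2))
      else if PySem.Chars.startswith t (L ++ [':']) then some (t.drop (L.length + 1))
      else none := by
  by_cases h : L <+: t
  · obtain ⟨u, rfl⟩ := h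
    have hd : ∀ k : Nat, (L ++ u).drop (L.length + k) = u.drop k := by
      intro k
      simp [List.drop_append]
    unfold pvMatchCore
    simp only [PySem.Chars.startswith_iff, List.prefix_append_right_inj, hd,
      List.drop_left, List.prefix_append, if_true]
    rcases u with _ | ⟨c, r⟩
    · simp
    · by_cases hc : c = '.'
      · subst hc
        simp only [List.take_succ_cons, List.take_zero, List.drop_succ_cons, List.drop_zero,
          List.cons_prefix_cons, true_and]
        rcases r with _ | ⟨d, r'⟩
        · simp
        · simp [List.cons_prefix_cons, List.nil_prefix, apply_ite]
      · by_cases hc2 : c = ':'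
        · subst hc2
          simp only [List.take_succ_cons, List.take_zero, List.drop_succ_cons, List.drop_zero,
            List.cons_prefix_cons, true_and]
          rcases r with _ | ⟨d, r'⟩
          · simp [hc]
          · simp [hc, List.cons_prefix_cons, List.nil_prefix, apply_ite]
        · have hc' : ¬(('.' : Char) = c) := fun h => hc h.symm
          have hc2' : ¬((':' : Char) = c) := fun h => hc2 h.symm
          simp [hc, hc', hc2, hc2', List.cons_prefix_cons]
  · have h4 : ∀ x : List Char, ¬ (L ++ x) <+: t := fun x hx => h ((List.prefix_append L x).trans hx)
    unfold pvMatchCore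
    simp [PySem.Chars.startswith_iff, h, h4]

-- if the letter is a prefix of both t and ' '::t, the char after the letter in ' '::t is a space
theorem pv_drop_both (L : List Char) : ∀ t : List Char, L <+: (' ' :: t) → L <+: t →
    (' ' :: t).drop L.length = ' ' :: t.drop L.length := by
  induction L with
  | nil => intro t _ _; simp
  | cons c L' ih =>
    intro t h1 h2
    rw [List.cons_prefix_cons] at h1
    obtain ⟨rfl, h1'⟩ := h1
    obtain ⟨u, rfl⟩ := h2
    have hih := ih (L' ++ u) (by simpa using h1') (List.prefix_append L' u)
    simpa using hih

-- at most one of the two leading-space choices of the regex can match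
theorem pvMatchCore_disj (L t : List Char) (r : List Char) (h : pvMatchCore L t = some r) :
    pvMatchCore L (' ' :: t) = none := by
  unfold pvMatchCore at h ⊢
  by_cases h1 : PySem.Chars.startswith (' ' :: t) L
  · by_cases h2 : PySem.Chars.startswith t L
    · rw [PySem.Chars.startswith_iff] at h1 h2
      rw [pv_drop_both L t h1 h2]
      simp only [h1, PySem.Chars.startswith_iff, if_pos, List.take_succ_cons, List.take_zero]
      simp
    · simp [h2] at h
  · simp [h1]

theorem pvRemove_eq (L : List Char) (c : Char) (t : List Char) :
    pvRemoveFirst (c :: t) (pvPrefixes L) =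
      (match (if c = ' ' then pvMatchCore L t else none) with
       | some r => r
       | none => ((pvMatchCore L (c :: t)).getD (c :: t))) := by
  by_cases hc : c = ' '
  · subst hc
    have hsw : ∀ x : List Char,
        PySem.Chars.startswith (' ' :: t) ((' ' :: L) ++ x) = PySem.Chars.startswith t (L ++ x) := by
      intro x
      rw [Bool.eq_iff_iff]
      simp [PySem.Chars.startswith_iff, List.cons_append, List.cons_prefix_cons]
    cases hm : pvMatchCore L t with
    | some r =>
      have hn : pvMatchCore L (' ' :: t) = none := pvMatchCore_disj L t r hm
      rw [pvMatchCore_eq] at hn hm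
      simp only [pvPrefixes, pvRemoveFirst, hsw, List.length_append, List.length_cons,
        List.length_nil]
      split_ifs at hn hm ⊢ <;>
        simp_all
    | none =>
      rw [pvMatchCore_eq] at hm
      rw [pvMatchCore_eq]
      simp only [pvPrefixes, pvRemoveFirst, hsw, List.length_append, List.length_cons,
        List.length_nil]
      split_ifs at hm ⊢ <;>
        simp_all
  · have hns : ∀ x : List Char,
        PySem.Chars.startswith (c :: t) ((' ' :: L) ++ x) = false := by
      intro x
      rw [← Bool.not_eq_true, PySem.Chars.startswith_iff, List.cons_append, List.cons_prefix_cons]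
      exact fun hx => hc hx.1.symm
    simp only [if_neg hc]
    rw [pvMatchCore_eq]
    simp only [pvPrefixes, pvRemoveFirst, hns, List.length_append, List.length_cons,
      List.length_nil, Bool.false_eq_true, if_false]
    split_ifs <;> simp

-- ===== VERDICT (by name: the statement is the Claim_ definition above) =====
theorem clean_option_content_spec : Claim_equal_clean_option_content := by
  intro oc ol _
  unfold Spec_clean_option_content clean_option_content clean_option_content_alt
  match h : oc.toList with
  | [] => rfl
  | c :: t => simp only [pvRemove_eq]
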